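-- pv_equiv track=rewrite | github.com/joeflack4/Challenges | UniqueArrayItems & Vertical Histogram/Challenges.py | get_under_99_tally
-- ===== SOURCE A (Python) =====
-- def get_under_99_tally(array):
--     tally = {}
--     # tally = self.append_header(tally)
--     for item in array:
--         if item < 99:
--             if item in tally:
--                 count = tally[item] + 1
--             else:
--                 count = 1
--             tally.update({item: count})
--     return tally
-- ===== SOURCE B (Python) =====
-- def get_under_99_tally(array):
--     under = [x for x in array if x < 99]
--     return {v: under.count(v) for v in dict.fromkeys(under)}
-- ===== Notes on version B (the rewrite author's own statement) =====
-- stated objective: idiomatic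
-- what changed: Replaces A's incremental hash-accumulation loop with a two-liner: filter once, then a dict comprehension over the distinct values (dict.fromkeys) counting each with list.count.
import Mathlib
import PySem

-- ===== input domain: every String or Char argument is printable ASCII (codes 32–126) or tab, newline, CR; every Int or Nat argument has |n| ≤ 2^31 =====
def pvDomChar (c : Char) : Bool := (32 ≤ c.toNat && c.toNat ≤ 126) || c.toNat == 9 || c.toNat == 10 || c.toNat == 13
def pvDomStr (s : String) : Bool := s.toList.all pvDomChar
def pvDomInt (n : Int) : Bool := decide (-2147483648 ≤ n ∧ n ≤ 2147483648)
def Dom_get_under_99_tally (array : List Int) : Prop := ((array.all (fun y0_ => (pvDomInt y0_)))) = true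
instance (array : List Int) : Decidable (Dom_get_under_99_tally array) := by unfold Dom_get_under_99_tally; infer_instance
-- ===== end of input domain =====

-- B replaces A's incremental hash-accumulation loop by filtering once, then a dict
-- comprehension over the distinct values counting each with list.count (idiomatic).

-- ===== PORT A =====
-- literal port of A: dict accumulation loop; `tally.update({item: count})` = insert (overwrite keeps position)
def get_under_99_tally (array : List Int) : List (Int × Int) :=
  (array.foldl (fun (tally : PySem.Dict Int Int) (item : Int) =>
    if item < 99 then
      match PySem.Dict.get? tally item with
      | some c => PySem.Dict.insert tally item (c + 1)
      | none   => PySem.Dict.insert tally item 1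
    else tally) (PySem.Dict.empty : PySem.Dict Int Int)).items

-- ===== PORT B =====
-- `under = [x for x in array if x < 99]`; `{v: under.count(v) for v in dict.fromkeys(under)}`
def get_under_99_tally_alt (array : List Int) : List (Int × Int) :=
  let under := array.filter (fun x => decide (x < 99))
  (PySem.List.dedup under).map (fun v => (v, (PySem.List.count under v : Int)))

-- ===== PRECONDITION & SPEC =====
def Spec_get_under_99_tally (array : List Int) (out : List (Int × Int)) : Prop := out = get_under_99_tally_alt array
instance (array : List Int) (out : List (Int × Int)) : Decidable (Spec_get_under_99_tally array out) := by unfold Spec_get_under_99_tally; infer_instance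

-- ===== CLAIM (what is proved, stated in full; the proofs are below) =====
def Claim_equal_get_under_99_tally : Prop := ∀ (array : List Int), Dom_get_under_99_tally array → Spec_get_under_99_tally array (get_under_99_tally array)

-- ===== LEMMAS AND PROOFS =====

-- A's loop body (match on get?) is the standard counter step insert x (getD x 0 + 1)
lemma stepA_eq (tally : PySem.Dict Int Int) (item : Int) :
    (match PySem.Dict.get? tally item with
      | some c => PySem.Dict.insert tally item (c + 1)
      | none   => PySem.Dict.insert tally item 1) =
    PySem.Dict.insert tally item (PySem.Dict.getD tally item 0 + 1) := by
  rcases h : PySem.Dict.get? tally item with _ | c <;>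
    simp [PySem.Dict.getD_eq_get?_getD, h]

-- ===== VERDICT (by name: the statement is the Claim_ definition above) =====
theorem get_under_99_tally_spec : Claim_equal_get_under_99_tally := by
  intro array _
  unfold Spec_get_under_99_tally get_under_99_tally get_under_99_tally_alt
  have h1 : (array.foldl (fun (tally : PySem.Dict Int Int) (item : Int) =>
      if item < 99 then
        (match PySem.Dict.get? tally item with
          | some c => PySem.Dict.insert tally item (c + 1)
          | none   => PySem.Dict.insert tally item 1)
      else tally) PySem.Dict.empty) =
      ((array.filter (fun x => decide (x < 99))).foldl
        (fun d x => PySem.Dict.insert d x (PySem.Dict.getD d x 0 + 1)) (PySem.Dict.empty : PySem.Dict Int Int)) := by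
    rw [← PySem.List.foldl_if_eq_foldl_filter (fun x => decide (x < 99))
      (fun d x => PySem.Dict.insert d x (PySem.Dict.getD d x 0 + 1)) array (PySem.Dict.empty : PySem.Dict Int Int)]
    congr 1
    funext d x
    by_cases h : x < 99 <;> simp [h, stepA_eq]
  rw [h1, PySem.Dict.foldl_insert_getD_add_one_eq_counter, PySem.Dict.items_counter]
  simp [PySem.List.dedup_eq_ofList, PySem.List.count_eq]
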